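-- pv_equiv track=rewrite | github.com/gromicho/testapp | app.py | rotations_to_coords
-- ===== SOURCE A (Python) =====
-- Coord = tuple[int, int]
--
-- DayCoords = list[Coord]
--
-- Rotations = list[int]
--
-- DIR_VECTORS: list[Coord] = [
--     (-1, 0), (-1, 1), (0, 1), (1, 1),
--     (1, 0), (1, -1), (0, -1), (-1, -1)
-- ]
--
-- DIR_TO_IDX: dict[str, int] = {"N": 0, "NE": 1, "E": 2, "SE": 3, "S": 4, "SW": 5, "W": 6, "NW": 7}
--
-- def rotations_to_coords(start_cell: Coord, start_dir: str, rotations: Rotations) -> tuple[DayCoords, int]: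
--     """
--     Build coordinate sequence from start cell, heading, and turns.
--
--     Returns
--     -------
--     (coords, final_dir_idx)
--     """
--     y, x = start_cell
--     dir_idx = DIR_TO_IDX[start_dir]
--     coords: DayCoords = [(y, x)]
--     for r in rotations:
--         dir_idx = (dir_idx + r) % 8
--         dy, dx = DIR_VECTORS[dir_idx]
--         y, x = y + dy, x + dx
--         coords.append((y, x))
--     return coords, dir_idx
-- ===== SOURCE B (Python) =====
-- from itertools import accumulate
--
-- DIR_VECTORS = [
--     (-1, 0), (-1, 1), (0, 1), (1, 1),
--     (1, 0), (1, -1), (0, -1), (-1, -1)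
-- ]
--
-- DIR_TO_IDX = {"N": 0, "NE": 1, "E": 2, "SE": 3, "S": 4, "SW": 5, "W": 6, "NW": 7}
--
--
-- def rotations_to_coords(start_cell, start_dir, rotations):
--     dirs = list(accumulate(rotations, lambda d, r: (d + r) % 8,
--                            initial=DIR_TO_IDX[start_dir]))
--     deltas = [DIR_VECTORS[d] for d in dirs[1:]]
--     ys = list(accumulate((dy for dy, _ in deltas), initial=start_cell[0]))
--     xs = list(accumulate((dx for _, dx in deltas), initial=start_cell[1]))
--     return list(zip(ys, xs)), dirs[-1]
-- ===== Notes on version B (the rewrite author's own statement) =====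
-- stated objective: idiomatic
-- what changed: Replaces the explicit state-mutating loop by three itertools.accumulate scans: cumulative direction indices, then cumulative y and x coordinates zipped into the path; final direction is the last element of the direction scan.
import Mathlib
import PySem

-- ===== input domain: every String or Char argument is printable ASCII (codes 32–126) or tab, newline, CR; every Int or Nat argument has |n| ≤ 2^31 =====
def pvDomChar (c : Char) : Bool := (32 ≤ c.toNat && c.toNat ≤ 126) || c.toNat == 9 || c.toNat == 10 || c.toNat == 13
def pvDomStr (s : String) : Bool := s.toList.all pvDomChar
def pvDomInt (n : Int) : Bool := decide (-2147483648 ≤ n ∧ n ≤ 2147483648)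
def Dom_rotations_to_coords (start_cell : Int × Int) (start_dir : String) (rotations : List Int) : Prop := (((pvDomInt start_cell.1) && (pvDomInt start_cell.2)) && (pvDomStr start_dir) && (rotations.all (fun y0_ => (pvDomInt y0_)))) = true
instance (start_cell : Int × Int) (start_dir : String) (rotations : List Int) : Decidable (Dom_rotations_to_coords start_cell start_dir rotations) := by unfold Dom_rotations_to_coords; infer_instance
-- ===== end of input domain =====

-- B replaces A's explicit state-mutating loop by accumulate scans (direction scan, then
-- coordinate scans zipped); same O(n) cost, objective: idiomatic.

-- ===== PORT A =====
def DIR_VECTORS : List (Int × Int) :=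
  [(-1, 0), (-1, 1), (0, 1), (1, 1), (1, 0), (1, -1), (0, -1), (-1, -1)]

def DIR_TO_IDX : PySem.Dict String Int :=
  PySem.Dict.ofList [("N", 0), ("NE", 1), ("E", 2), ("SE", 3), ("S", 4), ("SW", 5), ("W", 6), ("NW", 7)]

def rotations_to_coords (start_cell : Int × Int) (start_dir : String) (rotations : List Int) : (List (Int × Int)) × Int :=
  let y := start_cell.1
  let x := start_cell.2
  -- DIR_TO_IDX[start_dir]: KeyError outside Pre_; getD 0 there (unreached under Pre_)
  let dir_idx := (DIR_TO_IDX.get? start_dir).getD 0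
  let st := rotations.foldl
    (fun (s : Int × Int × Int × List (Int × Int)) r =>
      let d := PySem.Int.mod (s.2.2.1 + r) 8
      -- DIR_VECTORS[d]: d is always in range (mod 8 ≥ 0); default unreached
      let dv := (PySem.List.pyGet? DIR_VECTORS d).getD (0, 0)
      let y' := s.1 + dv.1
      let x' := s.2.1 + dv.2
      (y', x', d, s.2.2.2 ++ [(y', x')]))
    (y, x, dir_idx, [(y, x)])
  (st.2.2.2, st.2.2.1)

-- ===== PORT B =====
def rotations_to_coords_alt (start_cell : Int × Int) (start_dir : String) (rotations : List Int) : (List (Int × Int)) × Int :=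
  let dirs := rotations.scanl (fun d r => PySem.Int.mod (d + r) 8) ((DIR_TO_IDX.get? start_dir).getD 0)
  let deltas := dirs.tail.map (fun d => (PySem.List.pyGet? DIR_VECTORS d).getD (0, 0))
  let ys := (deltas.map Prod.fst).scanl (· + ·) start_cell.1
  let xs := (deltas.map Prod.snd).scanl (· + ·) start_cell.2
  (ys.zip xs, dirs.getLast!)

-- ===== PRECONDITION & SPEC =====
-- Pre_ excludes exactly the inputs where A raises KeyError (start_dir not a compass key).
def Pre_rotations_to_coords (start_cell : Int × Int) (start_dir : String) (rotations : List Int) : Prop :=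
  start_dir = "N" ∨ start_dir = "NE" ∨ start_dir = "E" ∨ start_dir = "SE" ∨
  start_dir = "S" ∨ start_dir = "SW" ∨ start_dir = "W" ∨ start_dir = "NW"
instance (start_cell : Int × Int) (start_dir : String) (rotations : List Int) : Decidable (Pre_rotations_to_coords start_cell start_dir rotations) := by unfold Pre_rotations_to_coords; infer_instance

def pvWitness_rotations_to_coords : (Int × Int) × String × List Int := ((2, 3), "SE", [1, -2, 7])

def Spec_rotations_to_coords (start_cell : Int × Int) (start_dir : String) (rotations : List Int) (out : (List (Int × Int)) × Int) : Prop := out = rotations_to_coords_alt start_cell start_dir rotations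
instance (start_cell : Int × Int) (start_dir : String) (rotations : List Int) (out : (List (Int × Int)) × Int) : Decidable (Spec_rotations_to_coords start_cell start_dir rotations out) := by unfold Spec_rotations_to_coords; infer_instance

-- ===== CLAIM (what is proved, stated in full; the proofs are below) =====
def Claim_equal_rotations_to_coords : Prop := ∀ (start_cell : Int × Int) (start_dir : String) (rotations : List Int), Dom_rotations_to_coords start_cell start_dir rotations → Pre_rotations_to_coords start_cell start_dir rotations → Spec_rotations_to_coords start_cell start_dir rotations (rotations_to_coords start_cell start_dir rotations)

-- ===== LEMMAS AND PROOFS =====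

-- shorthand used only by the proofs
def pvStep (d r : Int) : Int := PySem.Int.mod (d + r) 8
def pvVec (d : Int) : Int × Int := (PySem.List.pyGet? DIR_VECTORS d).getD (0, 0)

-- reference recursion: from (y, x, d) and the rotation list, produce
-- (final y, final x, final dir, the coordinates after the start cell)
def pvRef (y x d : Int) : List Int → Int × Int × Int × List (Int × Int)
  | [] => (y, x, d, [])
  | r :: rs =>
      let d' := pvStep d r
      let v := pvVec d'
      let t := pvRef (y + v.1) (x + v.2) d' rs
      (t.1, t.2.1, t.2.2.1, (y + v.1, x + v.2) :: t.2.2.2)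

-- the scanl-based pair computed by port B, from raw state
def pvB (y x d : Int) (rs : List Int) : (List (Int × Int)) × Int :=
  let dirs := rs.scanl pvStep d
  let deltas := dirs.tail.map pvVec
  let ys := (deltas.map Prod.fst).scanl (· + ·) y
  let xs := (deltas.map Prod.snd).scanl (· + ·) x
  (ys.zip xs, dirs.getLast!)

lemma scanl_map_head (b : Int) (l : List Int) :
    (List.scanl pvStep b l).map pvVec = pvVec b :: ((List.scanl pvStep b l).tail.map pvVec) := by
  cases l <;> simp [List.scanl]

lemma getLast!_cons_scanl (d b : Int) (l : List Int) :
    (d :: List.scanl pvStep b l).getLast! = (List.scanl pvStep b l).getLast! := by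
  cases l <;> simp [List.scanl, List.getLast!, List.getLast]

lemma pvB_eq_ref (rs : List Int) : ∀ (y x d : Int),
    pvB y x d rs = ((y, x) :: (pvRef y x d rs).2.2.2, (pvRef y x d rs).2.2.1) := by
  induction rs with
  | nil => intro y x d; simp [pvB, pvRef, List.scanl]
  | cons r rs ih =>
      intro y x d
      have h := ih (y + (pvVec (pvStep d r)).1) (x + (pvVec (pvStep d r)).2) (pvStep d r)
      simp only [pvB] at h ⊢
      simp only [List.scanl_cons, List.tail_cons, scanl_map_head, List.map_cons,
        List.zip_cons_cons, getLast!_cons_scanl, pvRef]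
      rw [Prod.mk.injEq] at h
      rw [Prod.mk.injEq]
      exact ⟨by rw [h.1], h.2⟩

lemma foldl_eq_ref (rs : List Int) : ∀ (y x d : Int) (acc : List (Int × Int)),
    rs.foldl
      (fun (s : Int × Int × Int × List (Int × Int)) r =>
        let d := PySem.Int.mod (s.2.2.1 + r) 8
        let dv := (PySem.List.pyGet? DIR_VECTORS d).getD (0, 0)
        let y' := s.1 + dv.1
        let x' := s.2.1 + dv.2
        (y', x', d, s.2.2.2 ++ [(y', x')]))
      (y, x, d, acc)
    = ((pvRef y x d rs).1, (pvRef y x d rs).2.1, (pvRef y x d rs).2.2.1, acc ++ (pvRef y x d rs).2.2.2) := by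
  induction rs with
  | nil => intro y x d acc; simp [pvRef]
  | cons r rs ih =>
      intro y x d acc
      simp only [List.foldl_cons, pvRef, pvStep, pvVec]
      rw [ih]
      simp

-- ===== VERDICT (by name: the statement is the Claim_ definition above) =====
theorem rotations_to_coords_spec : Claim_equal_rotations_to_coords := by
  intro sc sd rots _ _
  unfold Spec_rotations_to_coords
  have hB : rotations_to_coords_alt sc sd rots
      = ((sc.1, sc.2) :: (pvRef sc.1 sc.2 ((DIR_TO_IDX.get? sd).getD 0) rots).2.2.2,
         (pvRef sc.1 sc.2 ((DIR_TO_IDX.get? sd).getD 0) rots).2.2.1) := by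
    rw [show rotations_to_coords_alt sc sd rots
        = pvB sc.1 sc.2 ((DIR_TO_IDX.get? sd).getD 0) rots from rfl, pvB_eq_ref]
  rw [hB]
  unfold rotations_to_coords
  simp only [foldl_eq_ref]
  rfl
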